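-- pv_equiv track=rewrite | github.com/Elvich/Algorithms-and-data-structures | Term 2/Para 15.04.2025/Five.py | replace_series
-- ===== SOURCE A (Python) =====
-- def replace_series(A, L):
--     result = []
--     current_value = A[0]
--     count = 1
--
--     for i in range(1, len(A)):
--         if A[i] == current_value:
--             count += 1
--         else:
--             if count < L:
--                 result.append(0)
--             else:
--                 result.extend([current_value] * count)
--             current_value = A[i]
--             count = 1
--
--     if count < L:
--         result.append(0)
--     else:
--         result.extend([current_value] * count)
--
--     return result
-- ===== SOURCE B (Python) =====
-- def replace_series(A, L):
--     # Per-element DP: left[i] = length of the run of equal values ending at i,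
--     # right[i] = length of the run starting at i.  An element is kept iff its
--     # run's total length (left + right - 1) is >= L; a short run contributes a
--     # single 0, emitted at its start (where left == 1).
--     left = []
--     for i, a in enumerate(A):
--         left.append(left[-1] + 1 if i > 0 and A[i - 1] == a else 1)
--     right = []
--     for i in range(len(A) - 1, -1, -1):
--         right.append(right[-1] + 1 if i < len(A) - 1 and A[i + 1] == A[i] else 1)
--     right.reverse()
--     out = []
--     for a, lft, rgt in zip(A, left, right):
--         if lft + rgt - 1 >= L:
--             out.append(a)
--         elif lft == 1:
--             out.append(0)
--     return out
-- ===== Notes on version B (the rewrite author's own statement) =====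
-- stated objective: alternative
-- what changed: B replaces A's single run-scanning pass (current_value/count state) by a per-element dynamic-programming formulation: two DP passes compute for every index the run length ending there (left) and starting there (right), then a zip pass keeps an element iff left+right-1 >= L and emits one 0 at each short run's start (left == 1); no run counter or run boundary scan remains.
import Mathlib
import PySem

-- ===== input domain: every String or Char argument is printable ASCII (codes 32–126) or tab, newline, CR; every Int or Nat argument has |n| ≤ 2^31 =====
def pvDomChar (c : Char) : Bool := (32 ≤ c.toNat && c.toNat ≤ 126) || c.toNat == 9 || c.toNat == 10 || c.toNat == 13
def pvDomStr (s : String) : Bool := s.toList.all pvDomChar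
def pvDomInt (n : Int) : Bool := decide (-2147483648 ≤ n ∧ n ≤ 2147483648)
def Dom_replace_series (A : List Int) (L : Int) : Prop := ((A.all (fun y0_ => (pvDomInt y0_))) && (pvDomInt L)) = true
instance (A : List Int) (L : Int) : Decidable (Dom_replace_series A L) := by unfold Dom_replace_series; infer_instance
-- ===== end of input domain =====

-- B replaces A's run-scanning pass (current_value/count) by a per-element DP: two passes
-- compute for each index the run length ending/starting there, then a zip pass decides each
-- element; return-value equivalence on nonempty lists (A raises IndexError on []).

-- ===== PORT A =====
-- A's loop state: (result, current_value, count)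
def replace_series (A : List Int) (L : Int) : List Int :=
  let init : List Int × Int × Int := ([], PySem.List.pyGetD A 0 0, 1)
  let s := (PySem.List.pyRange 1 (PySem.List.len A) 1).foldl
    (fun (st : List Int × Int × Int) i =>
      if PySem.List.pyGetD A i 0 = st.2.1 then
        (st.1, st.2.1, st.2.2 + 1)
      else
        (st.1 ++ (if st.2.2 < L then [0] else List.replicate st.2.2.toNat st.2.1),
         PySem.List.pyGetD A i 0, 1))
    init
  s.1 ++ (if s.2.2 < L then [0] else List.replicate s.2.2.toNat s.2.1)

-- ===== PORT B =====
-- forward pass: left[i] = left[i-1]+1 if A[i-1]==A[i] else 1 (carrying prev value and prev left)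
def leftGo (p : Int) (c : Nat) : List Int → List Nat
  | [] => []
  | x :: xs =>
    let c' := if x = p then c + 1 else 1
    c' :: leftGo x c' xs

def leftRuns : List Int → List Nat
  | [] => []
  | x :: xs => 1 :: leftGo x 1 xs

-- backward pass: right[i] = right[i+1]+1 if A[i+1]==A[i] else 1 (tail computed first)
def rightRuns : List Int → List Nat
  | [] => []
  | [_] => [1]
  | x :: y :: xs =>
    let r := rightRuns (y :: xs)
    (if x = y then r.headD 1 + 1 else 1) :: r

def replace_series_alt (A : List Int) (L : Int) : List Int :=
  let left := leftRuns A
  let right := rightRuns A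
  (A.zip (left.zip right)).foldl
    (fun out t =>
      if (t.2.1 : Int) + (t.2.2 : Int) - 1 ≥ L then out ++ [t.1]
      else if t.2.1 = 1 then out ++ [0] else out) []

-- ===== PRECONDITION & SPEC =====
-- Pre_ excludes only the empty list, on which A raises IndexError (A[0]).
def Pre_replace_series (A : List Int) (L : Int) : Prop := A ≠ []
instance (A : List Int) (L : Int) : Decidable (Pre_replace_series A L) := by unfold Pre_replace_series; infer_instance
def pvWitness_replace_series : List Int × Int := ([1, 1, 2], 2)

def Spec_replace_series (A : List Int) (L : Int) (out : List Int) : Prop := out = replace_series_alt A L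
instance (A : List Int) (L : Int) (out : List Int) : Decidable (Spec_replace_series A L out) := by unfold Spec_replace_series; infer_instance

-- ===== CLAIM (what is proved, stated in full; the proofs are below) =====
def Claim_equal_replace_series : Prop := ∀ (A : List Int) (L : Int), Dom_replace_series A L → Pre_replace_series A L → Spec_replace_series A L (replace_series A L)
-- ===== LEMMAS AND PROOFS =====

-- length of the leading run of xs equal to v
def runLen (v : Int) : List Int → Nat
  | [] => 0
  | x :: xs => if x = v then runLen v xs + 1 else 0

-- canonical run-at-a-time recursion; both ports are proved equal to it
def runRec : List Int → Int → List Int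
  | [], _ => []
  | x :: xs, L =>
    let n : Nat := runLen x xs + 1
    (if (n : Int) < L then [0] else List.replicate n x) ++ runRec (List.drop n (x :: xs)) L
termination_by A => A.length
decreasing_by
  simp only [List.drop_succ_cons, List.length_cons, List.length_drop]
  omega

lemma runRec_cons (x : Int) (xs : List Int) (L : Int) :
    runRec (x :: xs) L =
      (if ((runLen x xs + 1 : Nat) : Int) < L then [0] else List.replicate (runLen x xs + 1) x) ++
        runRec (List.drop (runLen x xs) xs) L := by
  rw [runRec]
  simp only [List.drop_succ_cons]

-- ---------- A = runRec ----------

def emitA (L count cv : Int) : List Int :=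
  if count < L then [0] else List.replicate count.toNat cv

def stepA (L : Int) (st : List Int × Int × Int) (a : Int) : List Int × Int × Int :=
  if a = st.2.1 then (st.1, st.2.1, st.2.2 + 1) else (st.1 ++ emitA L st.2.2 st.2.1, a, 1)

lemma fold_invariant (L : Int) (xs : List Int) : ∀ (res : List Int) (cv count : Int), 1 ≤ count →
    (xs.foldl (stepA L) (res, cv, count)).1 ++
        emitA L (xs.foldl (stepA L) (res, cv, count)).2.2 (xs.foldl (stepA L) (res, cv, count)).2.1
      = res ++ emitA L (count + (runLen cv xs : Int)) cv ++
          runRec (List.drop (runLen cv xs) xs) L := by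
  induction xs with
  | nil => intro res cv count _; simp [runLen, runRec]
  | cons a xs ih =>
    intro res cv count hc
    by_cases h : a = cv
    · subst h
      have hstep : stepA L (res, a, count) a = (res, a, count + 1) := by simp [stepA]
      simp only [List.foldl_cons, hstep]
      rw [ih res a (count + 1) (by omega)]
      simp only [runLen, if_pos rfl, List.drop_succ_cons]
      push_cast
      ring_nf
      rw [Nat.add_comm 1 (runLen a xs), List.drop_succ_cons]
    · have hstep : stepA L (res, cv, count) a = (res ++ emitA L count cv, a, 1) := by
        simp [stepA, h]
      simp only [List.foldl_cons, hstep]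
      rw [ih (res ++ emitA L count cv) a 1 le_rfl]
      have hr : runLen cv (a :: xs) = 0 := by simp [runLen, h]
      rw [hr]
      simp only [List.drop_zero, Nat.cast_zero, add_zero, runRec_cons a xs L]
      have h1 : (1 : Int) + (runLen a xs : Int) = ((runLen a xs + 1 : Nat) : Int) := by push_cast; ring
      rw [h1]
      simp [emitA, List.append_assoc]

theorem a_eq_runRec (A : List Int) (L : Int) (h : A ≠ []) :
    replace_series A L = runRec A L := by
  obtain ⟨x, xs, rfl⟩ := List.exists_cons_of_ne_nil h
  show
    (let s := (PySem.List.pyRange 1 (PySem.List.len (x :: xs)) 1).foldl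
      (fun (st : List Int × Int × Int) i =>
        if PySem.List.pyGetD (x :: xs) i 0 = st.2.1 then
          (st.1, st.2.1, st.2.2 + 1)
        else
          (st.1 ++ (if st.2.2 < L then [0] else List.replicate st.2.2.toNat st.2.1),
           PySem.List.pyGetD (x :: xs) i 0, 1))
      ([], PySem.List.pyGetD (x :: xs) 0 0, 1);
      s.1 ++ (if s.2.2 < L then [0] else List.replicate s.2.2.toNat s.2.1))
      = runRec (x :: xs) L
  have hfold := PySem.List.foldl_pyRange_pyGetD (a := 1) (xs := x :: xs) (d := 0)
    (f := stepA L) (init := (([] : List Int), PySem.List.pyGetD (x :: xs) 0 0, 1)) (by norm_num)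
  simp only [PySem.List.len] at hfold ⊢
  have hbody : (fun (st : List Int × Int × Int) i =>
        if PySem.List.pyGetD (x :: xs) i 0 = st.2.1 then
          (st.1, st.2.1, st.2.2 + 1)
        else
          (st.1 ++ (if st.2.2 < L then [0] else List.replicate st.2.2.toNat st.2.1),
           PySem.List.pyGetD (x :: xs) i 0, 1))
      = (fun (acc : List Int × Int × Int) j => stepA L acc (PySem.List.pyGetD (x :: xs) j 0)) := by
    funext st i; simp [stepA, emitA]
  rw [hbody, hfold]
  have h0 : PySem.List.pyGetD (x :: xs) 0 0 = x := by
    simp [PySem.List.pyGetD, PySem.List.pyGet?, PySem.List.pyIdx?]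
  rw [h0]
  have hdrop : (x :: xs).drop ((1 : Int).toNat) = xs := by simp
  rw [hdrop]
  show (xs.foldl (stepA L) ([], x, 1)).1 ++
      emitA L (xs.foldl (stepA L) ([], x, 1)).2.2 (xs.foldl (stepA L) ([], x, 1)).2.1
      = runRec (x :: xs) L
  have := fold_invariant L xs [] x 1 le_rfl
  calc (xs.foldl (stepA L) ([], x, 1)).1 ++ emitA L (xs.foldl (stepA L) ([], x, 1)).2.2 (xs.foldl (stepA L) ([], x, 1)).2.1
      = [] ++ emitA L (1 + (runLen x xs : Int)) x ++ runRec (List.drop (runLen x xs) xs) L := this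
    _ = runRec (x :: xs) L := by
        rw [runRec_cons]
        have h1 : (1 : Int) + (runLen x xs : Int) = ((runLen x xs + 1 : Nat) : Int) := by push_cast; ring
        simp only [List.nil_append, h1, emitA]
        split <;> simp

-- ---------- B = runRec ----------

def pick (L : Int) (t : Int × Nat × Nat) : List Int :=
  if (t.2.1 : Int) + (t.2.2 : Int) - 1 ≥ L then [t.1]
  else if t.2.1 = 1 then [0] else []

lemma alt_flatMap (A : List Int) (L : Int) :
    replace_series_alt A L
      = (A.zip ((leftRuns A).zip (rightRuns A))).flatMap (pick L) := by
  show (A.zip ((leftRuns A).zip (rightRuns A))).foldl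
      (fun out t =>
        if (t.2.1 : Int) + (t.2.2 : Int) - 1 ≥ L then out ++ [t.1]
        else if t.2.1 = 1 then out ++ [0] else out) []
    = (A.zip ((leftRuns A).zip (rightRuns A))).flatMap (pick L)
  have hb : (fun (out : List Int) (t : Int × Nat × Nat) =>
        if (t.2.1 : Int) + (t.2.2 : Int) - 1 ≥ L then out ++ [t.1]
        else if t.2.1 = 1 then out ++ [0] else out)
      = fun out t => out ++ pick L t := by
    funext out t
    simp only [pick]
    split_ifs <;> simp
  rw [hb, PySem.List.foldl_append_eq_flatMap, List.nil_append]

-- run decomposition of a list by its leading run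
lemma runLen_take (v : Int) (xs : List Int) :
    xs.take (runLen v xs) = List.replicate (runLen v xs) v := by
  induction xs with
  | nil => simp [runLen]
  | cons x xs ih =>
    by_cases h : x = v
    · subst h; simp [runLen, List.replicate_succ, ih]
    · simp [runLen, h]

lemma runLen_drop_head (v : Int) (xs : List Int) :
    ∀ y, (xs.drop (runLen v xs)).head? = some y → y ≠ v := by
  induction xs with
  | nil => simp [runLen]
  | cons x xs ih =>
    by_cases h : x = v
    · subst h; simpa [runLen] using ih
    · intro y hy
      simp [runLen, h] at hy
      exact hy ▸ h

lemma runLen_le (v : Int) (xs : List Int) : runLen v xs ≤ xs.length := by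
  induction xs with
  | nil => simp [runLen]
  | cons x xs ih =>
    by_cases h : x = v <;> simp [runLen, h] <;> omega

-- fresh head: the forward pass restarts exactly like leftRuns
lemma leftGo_fresh (p : Int) (c : Nat) (rest : List Int)
    (h : ∀ y, rest.head? = some y → y ≠ p) : leftGo p c rest = leftRuns rest := by
  cases rest with
  | nil => rfl
  | cons y ys =>
    have hy : y ≠ p := h y rfl
    simp [leftGo, leftRuns, hy]

lemma leftGo_replicate (x : Int) (k : Nat) : ∀ (c : Nat) (rest : List Int),
    (∀ y, rest.head? = some y → y ≠ x) →
    leftGo x c (List.replicate k x ++ rest)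
      = (List.range k).map (fun i => c + 1 + i) ++ leftRuns rest := by
  induction k with
  | zero => intro c rest h; simpa using leftGo_fresh x c rest h
  | succ k ih =>
    intro c rest h
    simp only [List.replicate_succ, List.cons_append, leftGo, eq_self_iff_true, ite_true]
    rw [ih (c + 1) rest h, List.range_succ_eq_map]
    simp only [List.map_cons, List.map_map, List.cons_append, Nat.add_zero]
    have hf : ((fun i => c + 1 + i) ∘ Nat.succ) = fun i => c + 1 + 1 + i := by
      funext i; simp only [Function.comp_apply]; omega
    rw [hf]

lemma leftRuns_run (x : Int) (k : Nat) (rest : List Int)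
    (h : ∀ y, rest.head? = some y → y ≠ x) :
    leftRuns (List.replicate (k + 1) x ++ rest)
      = (List.range (k + 1)).map (fun i => i + 1) ++ leftRuns rest := by
  simp only [List.replicate_succ, List.cons_append, leftRuns]
  rw [leftGo_replicate x k 1 rest h, List.range_succ_eq_map]
  simp only [List.map_cons, List.map_map, List.cons_append, Nat.add_zero]
  have hf : ((fun i => i + 1) ∘ Nat.succ) = fun i => 1 + 1 + i := by
    funext i; simp only [Function.comp_apply]; omega
  rw [hf]
  cases rest <;> simp [leftRuns]

lemma rightRuns_cons₂ (x y : Int) (xs : List Int) :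
    rightRuns (x :: y :: xs)
      = (if x = y then (rightRuns (y :: xs)).headD 1 + 1 else 1) :: rightRuns (y :: xs) := by
  rfl

lemma rightRuns_run (x : Int) (k : Nat) (rest : List Int)
    (h : ∀ y, rest.head? = some y → y ≠ x) :
    rightRuns (List.replicate (k + 1) x ++ rest)
      = (List.range (k + 1)).map (fun i => k + 1 - i) ++ rightRuns rest := by
  induction k with
  | zero =>
    cases rest with
    | nil => simp [rightRuns]
    | cons y ys =>
      have hy : y ≠ x := h y rfl
      simp only [List.replicate_succ, List.replicate_zero, List.cons_append, List.nil_append]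
      rw [rightRuns_cons₂, if_neg (Ne.symm hy)]
      simp
  | succ k ih =>
    have hcons : List.replicate (k + 1 + 1) x ++ rest
        = x :: (x :: (List.replicate k x ++ rest)) := by
      simp [List.replicate_succ]
    have hinner : (x :: (List.replicate k x ++ rest)) = List.replicate (k + 1) x ++ rest := by
      simp [List.replicate_succ]
    rw [hcons, rightRuns_cons₂, if_pos rfl, hinner, ih]
    have hhead : (((List.range (k + 1)).map (fun i => k + 1 - i) ++ rightRuns rest).headD 1)
        = k + 1 := by
      rw [List.range_succ_eq_map]
      simp
    rw [hhead, List.range_succ_eq_map (n := k + 1)]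
    simp only [List.map_cons, List.map_map, List.cons_append, Nat.sub_zero]
    have hf : ((fun i => k + 1 + 1 - i) ∘ Nat.succ) = fun i => k + 1 - i := by
      funext i; simp only [Function.comp_apply]; omega
    rw [hf]

lemma flatMap_nil_of {α β : Type} (l : List α) (f : α → List β)
    (h : ∀ a ∈ l, f a = []) : l.flatMap f = [] := by
  induction l with
  | nil => rfl
  | cons a l ih =>
    simp only [List.flatMap_cons, h a (by simp), List.nil_append]
    exact ih (fun a ha => h a (by simp [ha]))

lemma flatMap_const_single {α β : Type} (l : List α) (f : α → List β) (x : β)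
    (h : ∀ a ∈ l, f a = [x]) : l.flatMap f = List.replicate l.length x := by
  induction l with
  | nil => rfl
  | cons a l ih =>
    simp only [List.flatMap_cons, h a (by simp), List.length_cons, List.replicate_succ]
    rw [ih (fun a ha => h a (by simp [ha]))]
    rfl

-- the first run's contribution to B's zip pass is exactly A's emission for that run
lemma segment_pick (x : Int) (k : Nat) (L : Int) :
    (List.range (k + 1)).flatMap (fun i => pick L (x, i + 1, k + 1 - i))
      = (if ((k + 1 : Nat) : Int) < L then [0] else List.replicate (k + 1) x) := by
  by_cases hL : ((k + 1 : Nat) : Int) < L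
  · rw [if_pos hL, List.range_succ_eq_map]
    simp only [List.flatMap_cons, List.flatMap_map]
    have h0 : pick L (x, 0 + 1, k + 1 - 0) = [0] := by
      simp only [pick]
      rw [if_neg (by push_cast at hL ⊢; omega)]
      norm_num
    have hrest : (List.range k).flatMap
        (fun i => pick L (x, Nat.succ i + 1, k + 1 - Nat.succ i)) = [] := by
      apply flatMap_nil_of
      intro i hi
      simp only [List.mem_range] at hi
      simp only [pick]
      have hki : ((k + 1 - Nat.succ i : Nat) : Int) = (k : Int) - i := by omega
      rw [if_neg (by push_cast [hki] at *; omega)]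
      rw [if_neg (by omega)]
    rw [h0]
    calc [0] ++ (List.range k).flatMap
          ((fun i => pick L (x, i + 1, k + 1 - i)) ∘ Nat.succ)
        = [0] ++ (List.range k).flatMap
            (fun i => pick L (x, Nat.succ i + 1, k + 1 - Nat.succ i)) := rfl
      _ = [0] := by rw [hrest, List.append_nil]
  · rw [if_neg hL]
    have hall : ∀ i ∈ List.range (k + 1), pick L (x, i + 1, k + 1 - i) = [x] := by
      intro i hi
      simp only [List.mem_range] at hi
      simp only [pick]
      have hki : ((k + 1 - i : Nat) : Int) = (k : Int) + 1 - i := by omega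
      rw [if_pos (by push_cast [hki] at *; omega)]
    rw [flatMap_const_single _ _ x hall, List.length_range]

lemma alt_eq_runRec_aux : ∀ (n : Nat) (A : List Int) (L : Int), A.length ≤ n →
    replace_series_alt A L = runRec A L := by
  intro n
  induction n with
  | zero =>
    intro A L hA
    have : A = [] := List.eq_nil_of_length_eq_zero (by omega)
    subst this
    simp [replace_series_alt, leftRuns, rightRuns, runRec]
  | succ n ih =>
    intro A L hA
    cases A with
    | nil => simp [replace_series_alt, leftRuns, rightRuns, runRec]
    | cons x xs =>
      set k := runLen x xs with hk
      set rest := xs.drop k with hrest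
      have hfresh : ∀ y, rest.head? = some y → y ≠ x := runLen_drop_head x xs
      have hsplit : x :: xs = List.replicate (k + 1) x ++ rest := by
        have := List.take_append_drop k xs
        rw [runLen_take x xs] at this
        calc x :: xs = x :: (List.replicate k x ++ rest) := by rw [← this]
          _ = List.replicate (k + 1) x ++ rest := by simp [List.replicate_succ]
      have hrest_eq : (rest.zip ((leftRuns rest).zip (rightRuns rest))).flatMap (pick L)
          = runRec rest L := by
        rw [← alt_flatMap]
        apply ih
        have hle := runLen_le x xs
        have hlr : rest.length = xs.length - k := by simp [hrest]
        simp only [List.length_cons] at hA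
        omega
      have hz2 := List.zip_append
        (l₁ := (List.range (k + 1)).map (fun i => i + 1)) (r₁ := leftRuns rest)
        (l₂ := (List.range (k + 1)).map (fun i => k + 1 - i)) (r₂ := rightRuns rest)
        (by simp)
      have hz1 := List.zip_append
        (l₁ := List.replicate (k + 1) x) (r₁ := rest)
        (l₂ := ((List.range (k + 1)).map (fun i => i + 1)).zip
                 ((List.range (k + 1)).map (fun i => k + 1 - i)))
        (r₂ := (leftRuns rest).zip (rightRuns rest))
        (by simp)
      have hrepl : List.replicate (k + 1) x = (List.range (k + 1)).map (fun _ => x) := by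
        rw [List.map_const']
        simp
      have hlhs : replace_series_alt (x :: xs) L
          = (if ((k + 1 : Nat) : Int) < L then [0] else List.replicate (k + 1) x)
              ++ runRec rest L := by
        rw [alt_flatMap, hsplit, leftRuns_run x k rest hfresh, rightRuns_run x k rest hfresh,
            hz2, hz1, List.flatMap_append, List.zip_map']
        conv_lhs => rw [hrepl, List.zip_map', List.flatMap_map]
        rw [segment_pick x k L, hrest_eq]
      rw [hlhs, runRec_cons]

theorem b_eq_runRec (A : List Int) (L : Int) : replace_series_alt A L = runRec A L :=
  alt_eq_runRec_aux A.length A L le_rfl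

-- ===== VERDICT (by name: the statements are the Claim_ definitions above) =====
theorem replace_series_spec : Claim_equal_replace_series := by
  intro A L _ hpre
  show replace_series A L = replace_series_alt A L
  rw [a_eq_runRec A L hpre, b_eq_runRec]
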